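-- pv_equiv track=rewrite | github.com/Simon-Wan/HandMeThat | data_generation/utils.py | rel_analysis
-- ===== SOURCE A (Python) =====
-- def rel_analysis(candidates, relevant):
--     result = list()
--     for rel in relevant:
--         if '#' not in rel:
--             for cand in candidates:
--                 if cand[:len(rel)] == rel:
--                     result.append(cand)
--         else:
--             result.append(rel)
--     return result
-- ===== SOURCE B (Python) =====
-- def rel_analysis(candidates, relevant):
--     # Build a prefix index once: every prefix of every candidate -> the
--     # candidates (in original order) having that prefix.  Each relevant
--     # pattern is then a single dictionary lookup instead of a scan.
--     index = {}
--     for cand in candidates: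
--         for i in range(len(cand) + 1):
--             index.setdefault(cand[:i], []).append(cand)
--     result = []
--     for rel in relevant:
--         if '#' in rel:
--             result.append(rel)
--         else:
--             result.extend(index.get(rel, []))
--     return result
-- ===== Notes on version B (the rewrite author's own statement) =====
-- stated objective: alternative
-- what changed: Instead of rescanning all candidates for every relevant pattern, B builds a prefix index once (dict from every candidate prefix to the matching candidates in order) and answers each pattern by a single dictionary lookup.
import Mathlib
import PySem

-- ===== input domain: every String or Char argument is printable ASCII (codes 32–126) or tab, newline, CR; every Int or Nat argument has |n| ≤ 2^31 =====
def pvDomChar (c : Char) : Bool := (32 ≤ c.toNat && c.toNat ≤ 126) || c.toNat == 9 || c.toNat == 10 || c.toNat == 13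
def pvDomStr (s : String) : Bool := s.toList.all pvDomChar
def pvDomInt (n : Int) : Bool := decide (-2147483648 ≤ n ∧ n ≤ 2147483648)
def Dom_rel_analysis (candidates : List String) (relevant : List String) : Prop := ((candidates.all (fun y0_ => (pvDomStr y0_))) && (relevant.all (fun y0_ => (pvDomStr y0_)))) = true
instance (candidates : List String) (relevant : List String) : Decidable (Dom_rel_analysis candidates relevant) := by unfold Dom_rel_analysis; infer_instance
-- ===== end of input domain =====

-- B builds a prefix index (dict: candidate prefix -> matching candidates in order) once
-- and answers each relevant pattern by a dictionary lookup instead of a scan (alternative algorithm).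

-- ===== PORT A =====
def rel_analysis (candidates : List String) (relevant : List String) : List String :=
  relevant.foldl (fun result rel =>
    if PySem.Str.isIn "#" rel = false then
      candidates.foldl (fun result cand =>
        if (PySem.Str.slice cand none (some (PySem.Str.len rel)) == rel) then
          result ++ [cand]
        else result) result
    else result ++ [rel]) []

-- ===== PORT B =====
-- index.setdefault(cand[:i], []).append(cand)  ==  modify key (default []) (· ++ [cand])
def pvBuildIndex (candidates : List String) : PySem.Dict String (List String) :=
  candidates.foldl (fun d cand =>
    (PySem.List.pyRange 0 (PySem.Str.len cand + 1) 1).foldl (fun d i =>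
      PySem.Dict.modify d (PySem.Str.slice cand none (some i)) []
        (fun l => l ++ [cand])) d) PySem.Dict.empty

def rel_analysis_alt (candidates : List String) (relevant : List String) : List String :=
  let index := pvBuildIndex candidates
  relevant.foldl (fun result rel =>
    if PySem.Str.isIn "#" rel then result ++ [rel]
    else result ++ PySem.Dict.getD index rel []) []

-- ===== PRECONDITION & SPEC =====
def Spec_rel_analysis (candidates : List String) (relevant : List String) (out : List String) : Prop := out = rel_analysis_alt candidates relevant
instance (candidates : List String) (relevant : List String) (out : List String) : Decidable (Spec_rel_analysis candidates relevant out) := by unfold Spec_rel_analysis; infer_instance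

-- ===== CLAIM (what is proved, stated in full; the proofs are below) =====
def Claim_equal_rel_analysis : Prop := ∀ (candidates : List String) (relevant : List String), Dom_rel_analysis candidates relevant → Spec_rel_analysis candidates relevant (rel_analysis candidates relevant)

-- ===== LEMMAS AND PROOFS =====

-- A's prefix test, characterised as list prefix
theorem pvMatch_iff (rel cand : String) :
    (PySem.Str.slice cand none (some (PySem.Str.len rel)) == rel) = true ↔ rel.toList <+: cand.toList := by
  rw [beq_iff_eq, ← String.toList_inj, PySem.Str.toList_slice]
  simp only [PySem.Str.len_eq, PySem.Chars.slice_eq_listSlice, PySem.List.slice_to_natCast]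
  rw [eq_comm, ← List.prefix_iff_eq_take]

-- the key B stores for index i is the i-prefix of cand
theorem pvKey_eq (cand : String) (i : Nat) :
    (PySem.Str.slice cand none (some (i : Int))).toList = cand.toList.take i := by
  simp [PySem.Str.toList_slice, PySem.List.slice_to_natCast]

-- per-candidate inner loop of B: its effect on the bucket of one key
theorem pvInner_getD (cand : String) (rel : String) (is : List Int)
    (d : PySem.Dict String (List String)) :
    PySem.Dict.getD (is.foldl (fun d i =>
        PySem.Dict.modify d (PySem.Str.slice cand none (some i)) []
          (fun l => l ++ [cand])) d) rel []
      = PySem.Dict.getD d rel []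
        ++ (is.filter (fun i =>
              PySem.Str.slice cand none (some i) == rel)).map (fun _ => cand) := by
  induction is generalizing d with
  | nil => simp
  | cons i is ih =>
    simp only [List.foldl_cons, List.filter_cons]
    rw [ih]
    by_cases h : PySem.Str.slice cand none (some i) = rel
    · simp [h]
    · simp [PySem.Dict.getD_modify, h, Ne.symm h]

-- the filter over prefix indices is a singleton iff rel is a prefix of cand
theorem pvTake_filter (cand rel : String) (m : Nat) (hm : m ≤ cand.toList.length + 1) :
    (List.range m).filter (fun i => decide (cand.toList.take i = rel.toList))
      = if rel.toList <+: cand.toList ∧ rel.toList.length < m then [rel.toList.length] else [] := by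
  induction m with
  | zero => simp
  | succ m ih =>
    rw [List.range_succ, List.filter_append, ih (by omega)]
    have hlen : m ≤ cand.toList.length := by omega
    have hiff : cand.toList.take m = rel.toList ↔ (rel.toList <+: cand.toList ∧ rel.toList.length = m) := by
      constructor
      · intro h
        have hl : rel.toList.length = m := by rw [← h, List.length_take]; omega
        exact ⟨by rw [← h]; exact List.take_prefix m cand.toList, hl⟩
      · rintro ⟨hp, hl⟩
        rw [← hl]; exact (List.prefix_iff_eq_take.mp hp).symm
    by_cases hp : rel.toList <+: cand.toList
    · by_cases he : rel.toList.length = m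
      · rw [if_neg (by omega), if_pos ⟨hp, by omega⟩]
        have h3 : cand.toList.take m = rel.toList := hiff.mpr ⟨hp, he⟩
        simp [h3, he]
      · have hne : ¬ cand.toList.take m = rel.toList := fun h => he (hiff.mp h).2
        have hcond : (rel.toList <+: cand.toList ∧ rel.toList.length < m) ↔ (rel.toList <+: cand.toList ∧ rel.toList.length < m + 1) :=
          ⟨fun ⟨a, b⟩ => ⟨a, by omega⟩, fun ⟨a, b⟩ => ⟨a, by omega⟩⟩
        simp only [List.filter_cons, List.filter_nil, hne, decide_false, Bool.false_eq_true, if_false]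
        rw [List.append_nil, if_congr hcond rfl rfl]
    · have hne : ¬ cand.toList.take m = rel.toList := fun h => hp (hiff.mp h).1
      simp [hp, hne]

-- B's index range, filtered by key = rel
theorem pvRange_filter (cand rel : String) :
    ((PySem.List.pyRange 0 (PySem.Str.len cand + 1) 1).filter (fun i =>
        PySem.Str.slice cand none (some i) == rel))
      = if rel.toList <+: cand.toList then [(rel.toList.length : Int)] else [] := by
  have hcast : PySem.Str.len cand + 1 = ((cand.toList.length + 1 : Nat) : Int) := by
    simp [PySem.Str.len_eq]
  rw [hcast, PySem.List.pyRange_zero_natCast, List.filter_map]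
  have hpred : ∀ i : Nat,
      ((fun i : Int => PySem.Str.slice cand none (some i) == rel) ∘ (fun k : Nat => (k : Int))) i
        = decide (cand.toList.take i = rel.toList) := by
    intro i
    simp only [Function.comp]
    rw [Bool.eq_iff_iff, beq_iff_eq, decide_eq_true_eq, ← String.toList_inj, pvKey_eq]
  rw [List.filter_congr (fun i _ => hpred i), pvTake_filter cand rel _ (le_refl _)]
  by_cases hp : rel.toList <+: cand.toList
  · rw [if_pos ⟨hp, by have := hp.length_le; omega⟩, if_pos hp]
    simp
  · rw [if_neg (fun h => hp h.1), if_neg hp]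
    simp

-- the index lookup is exactly A's inner filter
theorem pvBuildIndexAux_getD (rel : String) (cs : List String)
    (d : PySem.Dict String (List String)) :
    PySem.Dict.getD (cs.foldl (fun d cand =>
      (PySem.List.pyRange 0 (PySem.Str.len cand + 1) 1).foldl (fun d i =>
        PySem.Dict.modify d (PySem.Str.slice cand none (some i)) []
          (fun l => l ++ [cand])) d) d) rel []
      = PySem.Dict.getD d rel []
        ++ cs.filter (fun cand => PySem.Str.slice cand none (some (PySem.Str.len rel)) == rel) := by
  induction cs generalizing d with
  | nil => simp
  | cons cand cs ih =>
    simp only [List.foldl_cons, List.filter_cons]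
    rw [ih, pvInner_getD, pvRange_filter]
    by_cases hp : rel.toList <+: cand.toList
    · rw [if_pos hp]
      have hm : (PySem.Str.slice cand none (some (PySem.Str.len rel)) == rel) = true :=
        (pvMatch_iff rel cand).mpr hp
      simp only [hm, if_true]
      simp
    · rw [if_neg hp]
      have hm : (PySem.Str.slice cand none (some (PySem.Str.len rel)) == rel) = false := by
        rw [← Bool.not_eq_true, pvMatch_iff]; exact hp
      simp only [hm, Bool.false_eq_true, if_false]
      simp

theorem pvBuildIndex_getD (candidates : List String) (rel : String) :
    PySem.Dict.getD (pvBuildIndex candidates) rel []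
      = candidates.filter (fun cand =>
          PySem.Str.slice cand none (some (PySem.Str.len rel)) == rel) := by
  unfold pvBuildIndex
  rw [pvBuildIndexAux_getD]
  simp [PySem.Dict.getD, PySem.Dict.get?, PySem.Dict.empty]

-- ===== VERDICT (by name: the statement is the Claim_ definition above) =====
theorem rel_analysis_spec : Claim_equal_rel_analysis := by
  intro candidates relevant _
  unfold Spec_rel_analysis rel_analysis rel_analysis_alt
  apply PySem.List.foldl_congr_mem
  intro acc rel _
  by_cases hin : PySem.Str.isIn "#" rel = true
  · simp only [hin, if_true, Bool.true_eq_false, if_false]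
  · simp only [Bool.not_eq_true] at hin
    simp only [hin, Bool.false_eq_true, if_false, if_true]
    rw [PySem.List.foldl_append_if_eq_filter, pvBuildIndex_getD]
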